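-- pv_equiv track=rewrite | github.com/miliar/Code_Jam_Webscraper | solutions_python/Problem_178/1558.py | flip_start_pluses
-- ===== SOURCE A (Python) =====
-- def flip_until(input,i):
--     return ''.join([flip_char(char) for char in reversed(input[:i])])+input[i:]
--
-- def flip_start_pluses(input):
--     if input[0] == '+':
--         i = 1
--         while i < len(input):
--             if input[i] == '-':
--                 return flip_until(input, i)
--             i += 1
--
--     else:
--         return input
--
-- def flip_char(input):
--     if input == '-':
--         return '+'
--     else:
--         return '-'
-- ===== SOURCE B (Python) =====
-- def flip_start_pluses(input):
--     if input[0] != '+':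
--         return input
--     i = input.find('-')
--     if i == -1:
--         return None
--     return '-' * i + input[i:]
-- ===== Notes on version B (the rewrite author's own statement) =====
-- stated objective: simpler
-- what changed: Replaces the explicit index scan and the flip-of-reversed-prefix comprehension with str.find plus the closed form '-'*i + input[i:] (the scanned prefix contains no '-', so every character flips to '-' and the reversal is irrelevant).
import Mathlib
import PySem

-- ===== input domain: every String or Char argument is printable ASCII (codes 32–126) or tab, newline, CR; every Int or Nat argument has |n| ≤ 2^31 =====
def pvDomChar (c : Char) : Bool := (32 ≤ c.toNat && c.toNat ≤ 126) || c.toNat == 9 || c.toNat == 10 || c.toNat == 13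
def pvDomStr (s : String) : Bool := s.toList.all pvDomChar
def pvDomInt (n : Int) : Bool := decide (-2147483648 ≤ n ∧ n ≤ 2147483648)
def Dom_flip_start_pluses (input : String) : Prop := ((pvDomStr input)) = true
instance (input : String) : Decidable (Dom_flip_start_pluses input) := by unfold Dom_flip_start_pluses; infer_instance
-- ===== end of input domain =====

-- B replaces A's index scan and flip-of-reversed-prefix comprehension by str.find and the
-- closed form '-'*i + input[i:] (the prefix before the first '-' flips entirely to '-');
-- objective: simpler.

-- ===== PORT A =====
def flip_char (c : Char) : Char := if c = '-' then '+' else '-'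

def flip_until (input : String) (i : Nat) : String :=
  String.ofList
    (((PySem.List.slice input.toList none (some (i : Int))).reverse.map flip_char)
      ++ PySem.List.slice input.toList (some (i : Int)) none)

def flip_loopA (input : String) (i : Nat) : Option String :=
  if h : i < input.toList.length then
    if input.toList[i] = '-' then some (flip_until input i)
    else flip_loopA input (i + 1)
  else none
termination_by input.toList.length - i
decreasing_by have : i < input.toList.length := h; simp_all; omega

def flip_start_pluses (input : String) : Option String :=
  match PySem.Str.pyGet? input 0 with
  | none => none   -- Python raises IndexError here; excluded by Pre_
  | some c => if c = '+' then flip_loopA input 1 else some input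

-- ===== PORT B =====
def flip_start_pluses_alt (input : String) : Option String :=
  match PySem.Str.pyGet? input 0 with
  | none => none   -- Python raises IndexError here; excluded by Pre_
  | some c =>
    if c ≠ '+' then some input
    else
      let i := PySem.Str.find input "-"
      if i = -1 then none
      else some (String.ofList (List.replicate i.toNat '-' ++ input.toList.drop i.toNat))

-- ===== PRECONDITION & SPEC =====
-- Pre_ excludes only the empty string, on which both Pythons raise IndexError.
def Pre_flip_start_pluses (input : String) : Prop := input ≠ ""
instance (input : String) : Decidable (Pre_flip_start_pluses input) := by
  unfold Pre_flip_start_pluses; infer_instance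
def pvWitness_flip_start_pluses : String := "+5-a"

def Spec_flip_start_pluses (input : String) (out : Option String) : Prop :=
  out = flip_start_pluses_alt input
instance (input : String) (out : Option String) : Decidable (Spec_flip_start_pluses input out) := by
  unfold Spec_flip_start_pluses; infer_instance

-- ===== CLAIM (what is proved, stated in full; the proofs are below) =====
def Claim_equal_flip_start_pluses : Prop :=
  ∀ (input : String), Dom_flip_start_pluses input → Pre_flip_start_pluses input →
    Spec_flip_start_pluses input (flip_start_pluses input)

-- ===== LEMMAS AND PROOFS =====

-- all characters before the first '-' flip to '-', so the reversed-flipped prefix is a replicate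
theorem map_flip_char_of_no_dash (l : List Char) (h : ∀ x ∈ l, x ≠ '-') :
    l.reverse.map flip_char = List.replicate l.length '-' := by
  rw [List.eq_replicate_iff]
  constructor
  · simp
  · intro b hb
    simp only [List.mem_map, List.mem_reverse] at hb
    obtain ⟨a, ha, rfl⟩ := hb
    simp [flip_char, h a ha]

theorem flip_loopA_none (input : String) (i : Nat)
    (h : ∀ j, i ≤ j → (hj : j < input.toList.length) → input.toList[j] ≠ '-') :
    flip_loopA input i = none := by
  rw [flip_loopA]
  split
  · next hl =>
    rw [if_neg (h i le_rfl hl)]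
    exact flip_loopA_none input (i + 1) (fun j hj => h j (by omega))
  · rfl
termination_by input.toList.length - i
decreasing_by simp_all; omega

theorem flip_loopA_found (input : String) (i n : Nat) (hi : i ≤ n)
    (hn : n < input.toList.length) (hd : input.toList[n] = '-')
    (h : ∀ j, i ≤ j → j < n → (hj : j < input.toList.length) → input.toList[j] ≠ '-') :
    flip_loopA input i = some (flip_until input n) := by
  rw [flip_loopA]
  rcases eq_or_lt_of_le hi with rfl | hlt
  · rw [dif_pos hn, if_pos hd]
  · have hil : i < input.toList.length := lt_of_lt_of_le hlt (le_of_lt hn)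
    rw [dif_pos hil, if_neg (h i le_rfl hlt hil)]
    exact flip_loopA_found input (i + 1) n hlt hn hd (fun j hj => h j (by omega))
termination_by n - i

-- ===== VERDICT (by name: the statement is the Claim_ definition above) =====
theorem flip_start_pluses_spec : Claim_equal_flip_start_pluses := by
  intro input _ hpre
  unfold Spec_flip_start_pluses flip_start_pluses flip_start_pluses_alt
  have hne : input.toList ≠ [] := fun h => hpre (by simp_all)
  obtain ⟨c, cs, hcs⟩ := List.exists_cons_of_ne_nil hne
  have hget : PySem.Str.pyGet? input 0 = some c := by simp [hcs]
  rw [hget]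
  by_cases hc : c = '+'
  · simp only [hc, ne_eq, not_true_eq_false, if_false]
    have hfind : PySem.Str.find input "-" = PySem.Chars.find input.toList ['-'] := by
      simp [PySem.Str.find_eq]
    set f := PySem.Chars.find input.toList ['-'] with hf
    by_cases hneg : f = -1
    · -- no '-' anywhere: loop returns none, B returns none
      rw [hfind, if_pos hneg]
      have hno : ¬ (['-'] <:+: input.toList) := (PySem.Chars.find_eq_neg_one_iff _ _).mp hneg
      apply flip_loopA_none
      intro j _ hj hdash
      refine hno ⟨input.toList.take j, input.toList.drop (j+1), ?_⟩
      have hdj : input.toList.drop j = '-' :: input.toList.drop (j+1) := by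
        rw [List.drop_eq_getElem_cons hj, hdash]
      calc input.toList.take j ++ ['-'] ++ input.toList.drop (j+1)
          = input.toList.take j ++ input.toList.drop j := by rw [hdj]; simp
        _ = input.toList := List.take_append_drop j input.toList
    · rw [hfind, if_neg hneg]
      have hposf : 0 ≤ f := by
        have := PySem.Chars.neg_one_le_find input.toList ['-']
        omega
      obtain ⟨hpre', hmin⟩ :=
        PySem.Chars.find_spec (s := input.toList) (sub := ['-']) (by rw [← hf]; exact hposf)
      rw [← hf] at hpre' hmin
      set n := f.toNat with hn
      obtain ⟨t, ht⟩ := hpre'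
      have h1 : input.toList.drop n = '-' :: t := by simpa using ht.symm
      have hnlen : n < input.toList.length := by
        by_contra hcon
        have : input.toList.drop n = [] := List.drop_eq_nil_iff.mpr (by omega)
        simp [h1] at this
      have hdash : input.toList[n] = '-' := by
        have h2 := List.drop_eq_getElem_cons hnlen
        rw [h1] at h2
        exact ((List.cons_eq_cons.mp h2).1).symm
      have hnd : ∀ j, j < n → (hj : j < input.toList.length) → input.toList[j] ≠ '-' := by
        intro j hjn hj hdashj
        refine hmin j hjn ⟨input.toList.drop (j+1), ?_⟩
        rw [List.drop_eq_getElem_cons hj, hdashj]; simp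
      have hn1 : 1 ≤ n := by
        by_contra hcon
        have h0 : n = 0 := by omega
        have h00 : input.toList.drop n = input.toList := by rw [h0, List.drop_zero]
        rw [h00, hcs, hc] at h1
        simp at h1
      rw [flip_loopA_found input 1 n hn1 hnlen hdash (fun j _ hjn hjl => hnd j hjn hjl)]
      unfold flip_until
      rw [PySem.List.slice_to_natCast, PySem.List.slice_from_natCast]
      rw [map_flip_char_of_no_dash]
      · have hle : n ≤ input.length := by simpa using le_of_lt hnlen
        simp [Nat.min_eq_left hle]
      · intro x hx
        obtain ⟨j, hj, hxj⟩ := List.mem_iff_getElem.mp hx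
        have hjn : j < n := by simp at hj; omega
        have hjl : j < input.toList.length := by omega
        have hjt : (input.toList.take n)[j] = input.toList[j] := List.getElem_take
        rw [hjt] at hxj
        exact hxj ▸ hnd j hjn hjl
  · simp [hc]
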